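-- pv_equiv track=rewrite | github.com/renjmindy/PythonPractice | CodingChallenge/032921_Minimum_Steps_to_a_Palindrome.py | cal_minSteps
-- ===== SOURCE A (Python) =====
-- def cal_minSteps(s):
--
--     slist = list(s)
--     nlist = slist.copy()
--
--     if slist == slist[::-1]:
--         return 0
--
--     for i, j in enumerate(slist):
--         nlist.remove(j)
--         if nlist == nlist[::-1]:
--             return i + 1
-- ===== SOURCE B (Python) =====
-- def cal_minSteps(s):
--     n = len(s)
--     for k in range(n + 1):
--         t = s[k:]
--         if t == t[::-1]:
--             return k
-- ===== Notes on version B (the rewrite author's own statement) =====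
-- stated objective: simpler
-- what changed: B drops A's mutable working list and its remove-first-occurrence steps: since each removal always strips the current front element, B just scans k = 0..len(s) and returns the first k whose suffix s[k:] is a palindrome.
import Mathlib
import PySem

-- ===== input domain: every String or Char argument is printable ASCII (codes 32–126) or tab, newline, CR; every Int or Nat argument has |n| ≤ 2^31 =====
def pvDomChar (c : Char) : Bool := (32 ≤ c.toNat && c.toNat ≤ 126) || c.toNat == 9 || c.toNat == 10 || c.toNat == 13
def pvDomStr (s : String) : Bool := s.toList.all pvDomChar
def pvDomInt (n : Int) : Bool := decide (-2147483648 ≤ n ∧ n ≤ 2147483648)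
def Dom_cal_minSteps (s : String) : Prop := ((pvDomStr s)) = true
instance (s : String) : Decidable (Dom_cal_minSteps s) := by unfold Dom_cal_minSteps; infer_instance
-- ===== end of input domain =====

-- B replaces A's mutable list with repeated remove-first-occurrence by a plain scan
-- for the first k whose suffix is a palindrome (objective: simpler; same asymptotic cost).

-- ===== PORT A =====
-- the 'for i, j in enumerate(slist): nlist.remove(j); if nlist == nlist[::-1]: return i+1' loop;
-- falls off the end → none (never reached: the empty suffix is a palindrome);
-- remove? returning none = Python's ValueError (never reached: j is nlist's head) → none
def pvALoop : List (Int × Char) → List Char → Option Int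
  | [], _ => none
  | (i, j) :: rest, nlist =>
    match PySem.List.remove? nlist j with
    | none => none
    | some nlist' => if nlist' = nlist'.reverse then some (i + 1) else pvALoop rest nlist'

def cal_minSteps (s : String) : Option Int :=
  let slist := s.toList
  let nlist := slist
  if slist = slist.reverse then some 0
  else pvALoop (PySem.List.enumerate slist 0) nlist

-- ===== PORT B =====
-- 'for k in range(n+1): t = s[k:]; if t == t[::-1]: return k'
def pvBLoop (cs : List Char) (k : Nat) : Option Int :=
  if k ≤ cs.length then
    (let t := cs.drop k
     if t = t.reverse then some (k : Int) else pvBLoop cs (k + 1))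
  else none
termination_by cs.length + 1 - k

def cal_minSteps_alt (s : String) : Option Int := pvBLoop s.toList 0

-- ===== PRECONDITION & SPEC =====
def Spec_cal_minSteps (s : String) (out : Option Int) : Prop := out = cal_minSteps_alt s
instance (s : String) (out : Option Int) : Decidable (Spec_cal_minSteps s out) := by unfold Spec_cal_minSteps; infer_instance

-- ===== CLAIM (what is proved, stated in full; the proofs are below) =====
def Claim_equal_cal_minSteps : Prop := ∀ (s : String), Dom_cal_minSteps s → Spec_cal_minSteps s (cal_minSteps s)

-- ===== LEMMAS AND PROOFS =====

lemma pvALoop_eq_pvBLoop : ∀ (l : List Char) (i : Nat) (cs : List Char),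
    cs.drop i = l → pvALoop (PySem.List.enumerate l (i : Int)) l = pvBLoop cs (i + 1) := by
  intro l
  induction l with
  | nil =>
    intro i cs hdrop
    have hlen : cs.length ≤ i := by
      by_contra h
      have := List.drop_eq_nil_iff.mp hdrop
      omega
    rw [pvBLoop]
    simp [PySem.List.enumerate, pvALoop]
    omega
  | cons c t ih =>
    intro i cs hdrop
    have hlt : i < cs.length := by
      by_contra h
      have : cs.drop i = [] := List.drop_eq_nil_iff.mpr (by omega)
      rw [this] at hdrop
      simp at hdrop
    have hdrop' : cs.drop (i + 1) = t := by
      have h1 : cs.drop (i + 1) = (cs.drop i).drop 1 := by rw [List.drop_drop]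
      rw [h1, hdrop]
      rfl
    rw [PySem.List.enumerate_cons, pvALoop]
    simp only [PySem.List.remove?_cons_self]
    rw [pvBLoop, if_pos (by omega : i + 1 ≤ cs.length), hdrop']
    by_cases hpal : t = t.reverse
    · rw [if_pos hpal, if_pos hpal]
      norm_num
    · rw [if_neg hpal, if_neg hpal]
      have hcast : ((i : Int) + 1) = (((i + 1 : Nat)) : Int) := by push_cast; ring
      rw [hcast]
      exact ih (i + 1) cs hdrop'

-- ===== VERDICT (by name: the statement is the Claim_ definition above) =====
theorem cal_minSteps_spec : Claim_equal_cal_minSteps := by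
  intro s _
  unfold Spec_cal_minSteps cal_minSteps cal_minSteps_alt
  simp only
  by_cases hpal : s.toList = s.toList.reverse
  · rw [if_pos hpal, pvBLoop, if_pos (Nat.zero_le _)]
    simp only [List.drop_zero]
    rw [if_pos hpal]
    norm_num
  · rw [if_neg hpal, pvBLoop, if_pos (Nat.zero_le _)]
    simp only [List.drop_zero]
    rw [if_neg hpal]
    have h := pvALoop_eq_pvBLoop s.toList 0 s.toList (List.drop_zero)
    simpa using h
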